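-- pv_equiv track=rewrite | github.com/LeenaaAlhabsi/Package-Measurement-Conversion | updated_main_app.py | parse
-- ===== SOURCE A (Python) =====
-- def char_to_value(c):
--     if c == '_':
--         return 0
--     if 'a' <= c <= 'z':
--         return ord(c) - ord('a') + 1
--     raise ValueError(f"Invalid character '{c}' in input string")
--
-- def to_value_list(s: str):
--     """Convert string to value list, handling 'z' special case."""
--     L = []
--     i = 0
--     n = len(s)
--     while i < n:
--         if s[i] == 'z':
--             total = 0
--             while i < n and s[i] == 'z':
--                 total += char_to_value(s[i])
--                 i += 1
--             if i < n:
--                 total += char_to_value(s[i])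
--                 i += 1
--             L.append(total)
--         else:
--             L.append(char_to_value(s[i]))
--             i += 1
--     return L
--
-- def parse(s: str):
--     """Process value list with two-pointer grouping logic."""
--     values = to_value_list(s)
--     result = []
--     i = 0
--     n = len(values)
--     while i < n:
--         count = values[i]
--         i += 1
--         seg_sum = 0
--         for _ in range(count):
--             if i < n:
--                 seg_sum += values[i]
--                 i += 1
--         result.append(seg_sum)
--     return result
-- ===== SOURCE B (Python) =====
-- def parse(s: str):
--     """Decode in one fold (letter-run accumulator), then group via a prefix-sum table
--     with range queries instead of an inner per-element summation loop."""
--     vals = []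
--     acc = 0
--     for c in s:
--         if c == '_':
--             v = 0
--         elif 'a' <= c <= 'z':
--             v = ord(c) - 96
--         else:
--             raise ValueError(f"Invalid character '{c}' in input string")
--         if c == 'z':
--             acc += 26
--         else:
--             vals.append(acc + v)
--             acc = 0
--     if acc:
--         vals.append(acc)
--     n = len(vals)
--     P = [0]
--     for v in vals:
--         P.append(P[-1] + v)
--     res = []
--     i = 0
--     while i < n:
--         count = vals[i]
--         i += 1
--         end = min(i + count, n)
--         res.append(P[end] - P[i])
--         i = end
--     return res
-- ===== Notes on version B (the rewrite author's own statement) =====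
-- stated objective: alternative
-- what changed: The decode becomes a single left-to-right fold carrying a run accumulator for the maximal letter instead of nested while loops, and the grouping reads each segment sum as a range query on a precomputed prefix-sum table instead of an inner per-element summation loop.
import Mathlib
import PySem

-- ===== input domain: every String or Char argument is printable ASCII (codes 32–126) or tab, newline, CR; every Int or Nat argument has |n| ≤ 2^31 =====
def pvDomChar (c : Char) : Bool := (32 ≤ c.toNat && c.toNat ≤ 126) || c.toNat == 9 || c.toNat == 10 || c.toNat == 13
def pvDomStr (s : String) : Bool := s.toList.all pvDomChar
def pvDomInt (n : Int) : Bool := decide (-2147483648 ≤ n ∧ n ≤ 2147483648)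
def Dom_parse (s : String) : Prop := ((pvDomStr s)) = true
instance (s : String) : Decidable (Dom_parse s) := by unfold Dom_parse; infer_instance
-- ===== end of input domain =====

-- B decodes with a single fold (letter-run accumulator) and groups via prefix-sum range queries
-- instead of nested loops: a structurally different implementation of the same cost.

-- ===== PORT A =====
-- char_to_value: none = ValueError (excluded by Pre_parse)
def ctvA (c : Char) : Option Int :=
  if c = '_' then some 0
  else if 'a' ≤ c ∧ c ≤ 'z' then some ((c.toNat : Int) - 97 + 1)
  else none

-- to_value_list: tvlA is the outer while loop, tvlZ the inner letter-run while loop with running total t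
mutual
def tvlA : List Char → Option (List Int)
  | [] => some []
  | c :: cs =>
    if c = 'z' then tvlZ 26 cs
    else (ctvA c).bind fun v => (tvlA cs).map (fun rest => v :: rest)
termination_by structural cs => cs
def tvlZ (t : Int) : List Char → Option (List Int)
  | [] => some [t]
  | c :: cs =>
    if c = 'z' then tvlZ (t + 26) cs
    else (ctvA c).bind fun v => (tvlA cs).map (fun rest => (t + v) :: rest)
termination_by structural cs => cs
end

-- the inner 'for _ in range(count)' loop: runs count times, guarded by i < n
def segA : Nat → List Int → Int × List Int
  | 0, rest => (0, rest)
  | _ + 1, [] => (0, [])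
  | k + 1, v :: rest =>
    let p := segA k rest
    (v + p.1, p.2)

-- the outer while loop of parse; fuel (the number of values left) only makes the
-- recursion structural — each iteration consumes the head, so it never runs out
def groupA : Nat → List Int → List Int
  | _, [] => []
  | 0, _ :: _ => []
  | f + 1, c :: rest =>
    let p := segA c.toNat rest
    p.1 :: groupA f p.2

def parse (s : String) : List Int :=
  match tvlA s.toList with
  | some vs => groupA vs.length vs
  | none => []

-- ===== PORT B =====
def ctvB (c : Char) : Option Int :=
  if c = '_' then some 0
  else if 'a' ≤ c ∧ c ≤ 'z' then some ((c.toNat : Int) - 96)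
  else none

-- the single 'for c in s' fold: acc is the pending letter-run total, vals the output list
def decB : List Char → Int → List Int → Option (List Int)
  | [], acc, vals => some (if acc ≠ 0 then vals ++ [acc] else vals)
  | c :: cs, acc, vals =>
    (ctvB c).bind fun v =>
      if c = 'z' then decB cs (acc + 26) vals
      else decB cs 0 (vals ++ [acc + v])

-- the prefix-sum table P (P[k] = sum of the first k values)
def prefixList : List Int → Int → List Int
  | [], a => [a]
  | v :: vs, a => a :: prefixList vs (a + v)

-- the while loop: count = vals[i], end = min(i+1+count, n), O(1) range query on P;
-- fuel = n - i makes it structural (i strictly increases each iteration);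
-- decB only produces nonnegative values, so 'count.toNat' is Python's 'count' here
def groupB : Nat → List Int → List Int → Nat → Nat → List Int
  | 0, _, _, _, _ => []
  | f + 1, vals, P, n, i =>
    if i < n then
      let c := vals.getD i 0
      let e := min (i + 1 + c.toNat) n
      (P.getD e 0 - P.getD (i + 1) 0) :: groupB f vals P n e
    else []

def parse_alt (s : String) : List Int :=
  match decB s.toList 0 [] with
  | some vals => groupB vals.length vals (prefixList vals 0) vals.length 0
  | none => []

-- ===== PRECONDITION & SPEC =====
-- A raises ValueError on any character that is not an underscore or a lowercase letter; Pre_ excludes exactly those inputs.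
def Pre_parse (s : String) : Prop :=
  (s.toList.all fun c => c == '_' || ('a' ≤ c && c ≤ 'z')) = true
instance (s : String) : Decidable (Pre_parse s) := by unfold Pre_parse; infer_instance
def pvWitness_parse : String := "cabz_a"

def Spec_parse (s : String) (out : List Int) : Prop := out = parse_alt s
instance (s : String) (out : List Int) : Decidable (Spec_parse s out) := by unfold Spec_parse; infer_instance

-- ===== CLAIM (what is proved, stated in full; the proofs are below) =====
def Claim_equal_parse : Prop := ∀ (s : String), Dom_parse s → Pre_parse s → Spec_parse s (parse s)

-- ===== LEMMAS AND PROOFS =====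
theorem ctv_eq (c : Char) : ctvB c = ctvA c := by
  unfold ctvA ctvB
  split_ifs <;> simp
  ring

theorem decB_eq (cs : List Char) : ∀ vals : List Int,
    (decB cs 0 vals = (tvlA cs).map (vals ++ ·)) ∧
    (∀ t : Int, 0 < t → decB cs t vals = (tvlZ t cs).map (vals ++ ·)) := by
  induction cs with
  | nil =>
    intro vals
    refine ⟨by simp [decB, tvlA], ?_⟩
    intro t ht
    simp [decB, tvlZ, ht.ne']
  | cons c cs ih =>
    intro vals
    constructor
    · by_cases hz : c = 'z'
      · simp [decB, tvlA, hz, ctvB, (ih vals).2 26 (by norm_num)]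
      · simp only [decB, tvlA, hz, ctv_eq]
        cases hv : ctvA c with
        | none => simp
        | some v =>
          simp only [Option.bind_some]
          rw [(ih (vals ++ [0 + v])).1]
          cases tvlA cs <;> simp
    · intro t ht
      by_cases hz : c = 'z'
      · simp [decB, tvlZ, hz, ctvB, (ih vals).2 (t + 26) (by linarith)]
      · simp only [decB, tvlZ, hz, ctv_eq]
        cases hv : ctvA c with
        | none => simp
        | some v =>
          simp only [Option.bind_some]
          rw [(ih (vals ++ [t + v])).1]
          cases tvlA cs <;> simp

theorem segA_eq (k : Nat) : ∀ xs : List Int, segA k xs = ((xs.take k).sum, xs.drop k) := by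
  induction k with
  | zero => intro xs; simp [segA]
  | succ k ih =>
    intro xs
    cases xs with
    | nil => simp [segA]
    | cons v rest => simp [segA, ih rest]

theorem groupA_nil (f : Nat) : groupA f [] = [] := by
  cases f <;> rfl

theorem prefixList_getD (vs : List Int) : ∀ (a : Int) (j : Nat), j ≤ vs.length →
    (prefixList vs a).getD j 0 = a + (vs.take j).sum := by
  induction vs with
  | nil =>
    intro a j hj
    obtain rfl : j = 0 := by simpa using hj
    simp [prefixList]
  | cons v vs ih =>
    intro a j hj
    cases j with
    | zero => simp [prefixList]
    | succ j =>
      simp only [prefixList, List.getD_cons_succ, List.take_succ_cons, List.sum_cons]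
      rw [ih (a + v) j (by simpa using hj)]
      ring

theorem groupB_eq (vals : List Int) : ∀ (fB fA i : Nat), i ≤ vals.length →
    vals.length - i ≤ fB → vals.length - i ≤ fA →
    groupB fB vals (prefixList vals 0) vals.length i = groupA fA (vals.drop i) := by
  intro fB
  induction fB with
  | zero =>
    intro fA i hi hB _
    obtain rfl : i = vals.length := by omega
    rw [List.drop_of_length_le (le_refl _), groupA_nil]
    rfl
  | succ fB ih =>
    intro fA i hi hB hA
    by_cases h : i < vals.length
    · have hdrop : vals.drop i = vals.getD i 0 :: vals.drop (i + 1) := by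
        rw [List.getD_eq_getElem _ _ h]
        exact (List.getElem_cons_drop h).symm
      set c := vals.getD i 0 with hc
      set e := min (i + 1 + c.toNat) vals.length with he
      have hi1 : i + 1 ≤ vals.length := h
      have hee : i + 1 ≤ e := by omega
      have heL : e ≤ vals.length := by omega
      obtain ⟨fA', rfl⟩ : ∃ g, fA = g + 1 := ⟨fA - 1, by omega⟩
      rw [hdrop]
      show (if i < vals.length then _ else _) = _
      rw [if_pos h]
      simp only [groupA, segA_eq]
      have hseg : (prefixList vals 0).getD e 0 - (prefixList vals 0).getD (i + 1) 0 =
          ((vals.drop (i + 1)).take c.toNat).sum := by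
        rw [prefixList_getD vals 0 e heL, prefixList_getD vals 0 (i + 1) hi1]
        have htk : vals.take e = vals.take (i + 1) ++ ((vals.drop (i + 1)).take (e - (i + 1))) := by
          rw [← List.take_add]
          congr 1
          omega
        have htk2 : (vals.drop (i + 1)).take (e - (i + 1)) = (vals.drop (i + 1)).take c.toNat := by
          by_cases hle : i + 1 + c.toNat ≤ vals.length
          · congr 1; omega
          · have h1 : e = vals.length := by omega
            have hlen : (vals.drop (i + 1)).length = vals.length - (i + 1) := by simp
            rw [List.take_of_length_le (by omega), List.take_of_length_le (by omega)]
        rw [htk, htk2, List.sum_append]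
        ring
      have hrest : (vals.drop (i + 1)).drop c.toNat = vals.drop e := by
        rw [List.drop_drop]
        by_cases hle : i + 1 + c.toNat ≤ vals.length
        · congr 1; omega
        · rw [List.drop_of_length_le (by omega), List.drop_of_length_le (by omega)]
      rw [hseg, hrest, ih fA' e heL (by omega) (by omega)]
    · have : i = vals.length := by omega
      subst this
      rw [List.drop_of_length_le (le_refl _), groupA_nil]
      show (if vals.length < vals.length then _ else _) = _
      rw [if_neg (lt_irrefl _)]

theorem parse_eq_alt (s : String) : parse s = parse_alt s := by
  have hd := (decB_eq s.toList []).1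
  unfold parse parse_alt
  rw [hd]
  cases h : tvlA s.toList with
  | none => simp
  | some vs =>
    simp only [Option.map_some, List.nil_append]
    exact (groupB_eq vs vs.length vs.length 0 (Nat.zero_le _) (by omega) (by omega)).symm

-- ===== VERDICT (by name: the statement is the Claim_ definition above) =====
theorem parse_spec : Claim_equal_parse := by
  intro s _ _
  unfold Spec_parse
  exact parse_eq_alt s
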